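-- pv_equiv track=rewrite | github.com/SabidMahmud/CSE221_Algorithm | lab4/task6.py | max_diamonds
-- ===== SOURCE A (Python) =====
-- def dfs(grid, visited, row, col):
--     if row < 0 or row >= len(grid) or col < 0 or col >= len(grid[0]) or grid[row][col] == '#' or visited[row][col]:
--         return 0
--
--     visited[row][col] = True
--     diamonds_collected = 0
--
--     if grid[row][col] == 'D':
--         diamonds_collected = 1
--
--     directions = [(0, 1), (0, -1), (1, 0), (-1, 0)]
--     for dr, dc in directions:
--         diamonds_collected += dfs(grid, visited, row + dr, col + dc)
--
--     return diamonds_collected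
--
-- def max_diamonds(grid):
--     rows, cols = len(grid), len(grid[0])
--     visited = [[False] * cols for _ in range(rows)]
--
--     max_diamonds_collected = 0
--
--     for i in range(rows):
--         for j in range(cols):
--             if grid[i][j] == '.' and not visited[i][j]:
--                 diamonds_collected = dfs(grid, visited, i, j)
--                 max_diamonds_collected = max(max_diamonds_collected, diamonds_collected)
--
--     return max_diamonds_collected
-- ===== SOURCE B (Python) =====
-- def max_diamonds(grid):
--     rows, cols = len(grid), len(grid[0])
--     seen = set()
--     best = 0
--     for i, row in enumerate(grid):
--         for j, ch in enumerate(row[:cols]):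
--             if ch == '.' and (i, j) not in seen:
--                 total = 0
--                 stack = [(i, j)]
--                 while stack:
--                     r, c = stack.pop()
--                     if 0 <= r < rows and 0 <= c < cols and (r, c) not in seen and grid[r][c] != '#':
--                         seen.add((r, c))
--                         if grid[r][c] == 'D':
--                             total += 1
--                         stack += [(r - 1, c), (r + 1, c), (r, c - 1), (r, c + 1)]
--                 best = max(best, total)
--     return best
-- ===== Notes on version B (the rewrite author's own statement) =====
-- stated objective: alternative
-- what changed: The recursive four-way DFS over a preallocated boolean matrix is replaced by an iterative explicit-stack flood fill that records visited cells in a hash set of (row,col) pairs, with the outer scan rewritten over enumerate(grid)/enumerate(row) instead of index ranges.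
import Mathlib
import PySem

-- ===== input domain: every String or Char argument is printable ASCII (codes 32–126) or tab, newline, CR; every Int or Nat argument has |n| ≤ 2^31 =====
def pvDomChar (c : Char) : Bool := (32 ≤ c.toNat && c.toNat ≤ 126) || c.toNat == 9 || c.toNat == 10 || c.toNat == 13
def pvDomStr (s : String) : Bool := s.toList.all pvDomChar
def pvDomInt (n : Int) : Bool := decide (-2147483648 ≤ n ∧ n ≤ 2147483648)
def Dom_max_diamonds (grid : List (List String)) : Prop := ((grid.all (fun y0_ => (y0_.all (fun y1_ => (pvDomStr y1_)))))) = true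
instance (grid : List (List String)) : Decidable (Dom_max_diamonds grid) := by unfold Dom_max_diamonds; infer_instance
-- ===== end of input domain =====

-- B replaces the recursive DFS over a preallocated boolean matrix by an iterative
-- explicit-stack flood fill recording visited cells in a set of (row, col) pairs,
-- with the outer scan over enumerate(grid)/enumerate(row) (objective: alternative).

-- ===== PORT A =====
-- grid[r][c] / visited[r][c]: in A these are only evaluated after the bounds
-- guards (or, in the outer loop, under Pre_), so the `.getD` defaults are never the value used.
def pvGridGet (grid : List (List String)) (r c : Int) : String :=
  (PySem.List.pyGet? ((PySem.List.pyGet? grid r).getD []) c).getD ""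

def pvVisGet (v : List (List Bool)) (r c : Int) : Bool :=
  (PySem.List.pyGet? ((PySem.List.pyGet? v r).getD []) c).getD false

-- visited[r][c] = True  (guards ensure 0 ≤ r, 0 ≤ c at every use)
def pvMark (v : List (List Bool)) (r c : Int) : List (List Bool) :=
  v.modify r.toNat (fun row => row.set c.toNat true)

-- Python's recursive dfs; the `fuel` argument only makes the recursion structural
-- (it is proved never to run out for the fuel max_diamonds passes), and the loop over the
-- literal 4-element `directions` list is written out as its four iterations.
def pvDfs (grid : List (List String)) : Nat → List (List Bool) → Int → Int → Option (Int × List (List Bool))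
  | 0, _, _, _ => none
  | fuel+1, visited, row, col =>
    if row < 0 ∨ (grid.length : Int) ≤ row ∨ col < 0 ∨ (grid.headI.length : Int) ≤ col
        ∨ pvGridGet grid row col = "#" ∨ pvVisGet visited row col = true then
      some (0, visited)
    else
      match pvDfs grid fuel (pvMark visited row col) row (col+1) with
      | none => none
      | some (n1, v1) =>
        match pvDfs grid fuel v1 row (col-1) with
        | none => none
        | some (n2, v2) =>
          match pvDfs grid fuel v2 (row+1) col with
          | none => none
          | some (n3, v3) =>
            match pvDfs grid fuel v3 (row-1) col with
            | none => none
            | some (n4, v4) =>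
              some ((if pvGridGet grid row col = "D" then (1:Int) else 0) + n1 + n2 + n3 + n4, v4)

-- body of A's inner loop: seed a dfs when grid[i][j]=='.' and not visited[i][j]
def pvSeedA (grid : List (List String)) (i : Int) (s : List (List Bool) × Int) (j : Int) :
    List (List Bool) × Int :=
  if pvGridGet grid i j = "." ∧ pvVisGet s.1 i j = false then
    match pvDfs grid (grid.length * grid.headI.length + 1) s.1 i j with
    | none => s
    | some (n, v') => (v', max s.2 n)
  else s

def max_diamonds (grid : List (List String)) : Int :=
  ((PySem.List.pyRange 0 (grid.length : Int) 1).foldl (fun s i =>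
      (PySem.List.pyRange 0 (grid.headI.length : Int) 1).foldl (pvSeedA grid i) s)
    (List.replicate grid.length (List.replicate grid.headI.length false), (0:Int))).2

-- ===== PORT B =====
-- grid[r][c] on B's side; only evaluated after B's bounds guard, so the defaults never matter.
def pvCell (grid : List (List String)) (r c : Int) : String :=
  PySem.List.pyGetD (PySem.List.pyGetD grid r []) c ""

-- B's while-loop: the Lean list holds the Python stack with its TOP (end of the Python
-- list, where .pop() reads) at the HEAD, so `stack += [(r-1,c),(r+1,c),(r,c-1),(r,c+1)]`
-- becomes consing in the reverse order; `fuel` only makes the loop structural and is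
-- proved never to run out for the fuel max_diamonds_alt passes.
def pvFill (grid : List (List String)) : Nat → PySem.Set (Int × Int) → List (Int × Int) → Int → Option (Int × PySem.Set (Int × Int))
  | 0, _, _, _ => none
  | _+1, seen, [], total => some (total, seen)
  | fuel+1, seen, (r, c) :: rest, total =>
    if 0 ≤ r ∧ r < (grid.length : Int) ∧ 0 ≤ c ∧ c < (grid.headI.length : Int)
        ∧ (r, c) ∉ seen ∧ pvCell grid r c ≠ "#" then
      pvFill grid fuel (PySem.Set.add seen (r, c))
        ((r, c+1) :: (r, c-1) :: (r+1, c) :: (r-1, c) :: rest)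
        (if pvCell grid r c = "D" then total + 1 else total)
    else
      pvFill grid fuel seen rest total

-- body of B's inner loop: q = (j, ch) coming from enumerate(row[:cols])
def pvScanB (grid : List (List String)) (i : Int) (s : PySem.Set (Int × Int) × Int)
    (q : Int × String) : PySem.Set (Int × Int) × Int :=
  if q.2 = "." ∧ (i, q.1) ∉ s.1 then
    match pvFill grid (5 * (grid.length * grid.headI.length) + 2) s.1 [(i, q.1)] 0 with
    | none => s
    | some (total, seen') => (seen', max s.2 total)
  else s

-- row[:cols] is ported as row.take cols — exact, since cols = len(grid[0]) ≥ 0.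
def max_diamonds_alt (grid : List (List String)) : Int :=
  ((PySem.List.enumerate grid 0).foldl (fun s p =>
      (PySem.List.enumerate (p.2.take grid.headI.length) 0).foldl (pvScanB grid p.1) s)
    (PySem.Set.empty, (0:Int))).2

-- ===== PRECONDITION & SPEC =====
-- Pre_ excludes exactly the inputs where Python A raises IndexError: the empty grid
-- (len(grid[0])), and ragged grids with a row shorter than row 0 (grid[i][j] in the loops).
def Pre_max_diamonds (grid : List (List String)) : Prop :=
  grid ≠ [] ∧ ∀ row ∈ grid, grid.headI.length ≤ row.length
instance (grid : List (List String)) : Decidable (Pre_max_diamonds grid) := by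
  unfold Pre_max_diamonds; infer_instance

def pvWitness_max_diamonds : List (List String) := [[".", "D"], ["#", "D"]]

def Spec_max_diamonds (grid : List (List String)) (out : Int) : Prop := out = max_diamonds_alt grid
instance (grid : List (List String)) (out : Int) : Decidable (Spec_max_diamonds grid out) := by
  unfold Spec_max_diamonds; infer_instance

-- ===== CLAIM (what is proved, stated in full; the proofs are below) =====
def Claim_equal_max_diamonds : Prop := ∀ (grid : List (List String)), Dom_max_diamonds grid → Pre_max_diamonds grid → Spec_max_diamonds grid (max_diamonds grid)

-- ===== LEMMAS AND PROOFS =====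

-- shape invariant of A's visited matrix
def pvSh (grid : List (List String)) (v : List (List Bool)) : Prop :=
  v.length = grid.length ∧ ∀ row ∈ v, row.length = grid.headI.length

-- the coupling between A's boolean matrix and B's seen-set
def pvRel (grid : List (List String)) (v : List (List Bool)) (S : PySem.Set (Int × Int)) : Prop :=
  ∀ r c : Int, ((r, c) ∈ S ↔ (0 ≤ r ∧ r < (grid.length : Int) ∧ 0 ≤ c ∧
    c < (grid.headI.length : Int) ∧ pvVisGet v r c = true))

-- number of still-unvisited cells (the termination measure)
def pvUnvis (v : List (List Bool)) : Nat := (v.map (fun row => row.count false)).sum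

lemma pv_cell_eq (grid : List (List String)) (r c : Int) : pvCell grid r c = pvGridGet grid r c := by
  simp [pvCell, pvGridGet, PySem.List.pyGetD]

lemma pv_count_false_set (row : List Bool) (n : Nat) (h : n < row.length) (hf : row[n] = false) :
    (row.set n true).count false + 1 = row.count false := by
  induction row generalizing n with
  | nil => simp at h
  | cons a l ih =>
    cases n with
    | zero => simp at hf; subst hf; simp
    | succ n =>
      simp at h hf
      have := ih n h hf
      by_cases ha : a = false <;> simp [ha] <;> omega

lemma pv_unvis_modify (v : List (List Bool)) (i : Nat) (f : List Bool → List Bool)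
    (h : i < v.length) (hrow : (f v[i]).count false + 1 = v[i].count false) :
    pvUnvis (v.modify i f) + 1 = pvUnvis v := by
  induction v generalizing i with
  | nil => simp at h
  | cons a l ih =>
    cases i with
    | zero => simp [pvUnvis, List.modify] at *; omega
    | succ i =>
      simp at h hrow
      have := ih i h hrow
      rw [List.modify_succ_cons]
      simp only [pvUnvis, List.map_cons, List.sum_cons] at *
      omega

lemma pv_forall_mem_modify {α : Type} (P : α → Prop) (l : List α) (i : Nat) (f : α → α)
    (h : ∀ a ∈ l, P a) (hf : ∀ a ∈ l, P (f a)) : ∀ a ∈ l.modify i f, P a := by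
  induction l generalizing i with
  | nil => simp
  | cons a l ih =>
    cases i with
    | zero =>
      intro b hb
      rw [List.modify_zero_cons] at hb
      rcases List.mem_cons.mp hb with hb | hb
      · exact hb ▸ hf a (by simp)
      · exact h b (by simp [hb])
    | succ i =>
      intro b hb
      rw [List.modify_succ_cons] at hb
      rcases List.mem_cons.mp hb with hb | hb
      · exact hb ▸ h a (by simp)
      · exact ih i (fun x hx => h x (by simp [hx])) (fun x hx => hf x (by simp [hx])) b hb

lemma pv_sh_mark {grid : List (List String)} {v : List (List Bool)} {r c : Int}
    (hs : pvSh grid v) : pvSh grid (pvMark v r c) := by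
  refine ⟨by simpa [pvMark] using hs.1, ?_⟩
  exact pv_forall_mem_modify (fun row => row.length = grid.headI.length) v r.toNat
    (fun row => row.set c.toNat true) hs.2 (fun a ha => by simp [hs.2 a ha])

lemma pv_visGet_eq {v : List (List Bool)} {r c : Int} (hr0 : 0 ≤ r) (hr : r.toNat < v.length)
    (hc0 : 0 ≤ c) (hc : c.toNat < v[r.toNat].length) :
    pvVisGet v r c = v[r.toNat][c.toNat] := by
  unfold pvVisGet
  rw [PySem.List.pyGet?_eq_some_getElem v hr0 (by omega), Option.getD_some,
      PySem.List.pyGet?_eq_some_getElem _ hc0 (by omega), Option.getD_some]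

lemma pv_gridGet_eq {grid : List (List String)} {r c : Int} (hr0 : 0 ≤ r)
    (hr : r.toNat < grid.length) (hc0 : 0 ≤ c) (hc : c.toNat < grid[r.toNat].length) :
    pvGridGet grid r c = grid[r.toNat][c.toNat] := by
  unfold pvGridGet
  rw [PySem.List.pyGet?_eq_some_getElem grid hr0 (by omega), Option.getD_some,
      PySem.List.pyGet?_eq_some_getElem _ hc0 (by omega), Option.getD_some]

lemma pv_visGet_nonneg (v : List (List Bool)) (r c : Int) (hr0 : 0 ≤ r) (hc0 : 0 ≤ c) :
    pvVisGet v r c = ((v[r.toNat]?.getD [])[c.toNat]?).getD false := by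
  unfold pvVisGet
  rw [PySem.List.pyGet?_of_nonneg v hr0, PySem.List.pyGet?_of_nonneg _ hc0]

lemma pv_visGet_mark {grid : List (List String)} {v : List (List Bool)} {r c r' c' : Int}
    (hs : pvSh grid v) (hr0 : 0 ≤ r) (hr : r < (grid.length : Int)) (hc0 : 0 ≤ c)
    (hc : c < (grid.headI.length : Int)) (hr0' : 0 ≤ r') (hr' : r' < (grid.length : Int))
    (hc0' : 0 ≤ c') (hc' : c' < (grid.headI.length : Int)) :
    pvVisGet (pvMark v r c) r' c' = if r' = r ∧ c' = c then true else pvVisGet v r' c' := by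
  have hvl : v.length = grid.length := hs.1
  have hvr : r.toNat < v.length := by omega
  have hvr' : r'.toNat < v.length := by omega
  have hcw : c.toNat < v[r.toNat].length := by rw [hs.2 _ (List.getElem_mem hvr)]; omega
  have hcw' : c'.toNat < v[r'.toNat].length := by rw [hs.2 _ (List.getElem_mem hvr')]; omega
  rw [pv_visGet_nonneg (pvMark v r c) r' c' hr0' hc0', pv_visGet_nonneg v r' c' hr0' hc0']
  unfold pvMark
  rw [List.getElem?_modify]
  simp only [List.getElem?_eq_getElem hvr', Option.map_eq_map, Option.map_some,
    Option.getD_some]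
  by_cases hrr : r'.toNat = r.toNat
  · rw [if_pos hrr.symm, List.getElem?_set]
    have hclen : c.toNat < v[r'.toNat].length := by
      rw [hs.2 _ (List.getElem_mem hvr')]; omega
    by_cases hcc : c.toNat = c'.toNat
    · rw [if_pos hcc, if_pos hclen, if_pos (by omega : r' = r ∧ c' = c)]
      rfl
    · rw [if_neg hcc, if_neg (by omega : ¬ (r' = r ∧ c' = c)),
        List.getElem?_eq_getElem hcw', Option.getD_some]
  · rw [if_neg (fun h => hrr h.symm), if_neg (by omega : ¬ (r' = r ∧ c' = c)),
      List.getElem?_eq_getElem hcw', Option.getD_some]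

lemma pv_rel_mark {grid : List (List String)} {v : List (List Bool)} {S : PySem.Set (Int × Int)}
    {r c : Int} (hs : pvSh grid v) (hrel : pvRel grid v S) (hr0 : 0 ≤ r)
    (hr : r < (grid.length : Int)) (hc0 : 0 ≤ c) (hc : c < (grid.headI.length : Int)) :
    pvRel grid (pvMark v r c) (PySem.Set.add S (r, c)) := by
  intro r' c'
  rw [PySem.Set.mem_add]
  constructor
  · rintro (hmem | heq)
    · obtain ⟨h1, h2, h3, h4, h5⟩ := (hrel r' c').mp hmem
      refine ⟨h1, h2, h3, h4, ?_⟩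
      rw [pv_visGet_mark hs hr0 hr hc0 hc h1 h2 h3 h4]
      split_ifs with h
      · rfl
      · exact h5
    · obtain ⟨h1, h2⟩ := Prod.mk.injEq .. ▸ heq
      subst h1; subst h2
      refine ⟨hr0, hr, hc0, hc, ?_⟩
      rw [pv_visGet_mark hs hr0 hr hc0 hc hr0 hr hc0 hc]
      simp
  · rintro ⟨h1, h2, h3, h4, h5⟩
    rw [pv_visGet_mark hs hr0 hr hc0 hc h1 h2 h3 h4] at h5
    by_cases heq : r' = r ∧ c' = c
    · right; rw [heq.1, heq.2]
    · rw [if_neg heq] at h5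
      exact Or.inl ((hrel r' c').mpr ⟨h1, h2, h3, h4, h5⟩)

lemma pv_unvis_mark {grid : List (List String)} {v : List (List Bool)} {r c : Int}
    (hs : pvSh grid v) (hr0 : 0 ≤ r) (hr : r < (grid.length : Int)) (hc0 : 0 ≤ c)
    (hc : c < (grid.headI.length : Int)) (hv : pvVisGet v r c = false) :
    pvUnvis (pvMark v r c) + 1 = pvUnvis v := by
  have hl := hs.1
  have hr' : r.toNat < v.length := by omega
  have hcrow : c.toNat < v[r.toNat].length := by
    rw [hs.2 _ (List.getElem_mem hr')]; omega
  have hfalse : v[r.toNat][c.toNat] = false := by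
    rw [← pv_visGet_eq hr0 hr' hc0 hcrow]; exact hv
  exact pv_unvis_modify v r.toNat _ hr' (pv_count_false_set _ _ hcrow hfalse)

lemma pv_unvis_le_aux (C : Nat) (v : List (List Bool)) (hs : ∀ row ∈ v, row.length = C) :
    pvUnvis v ≤ v.length * C := by
  induction v with
  | nil => simp [pvUnvis]
  | cons a l ih =>
    have h1 : a.count false ≤ C := by
      rw [← hs a (by simp)]; exact List.count_le_length
    have h2 := ih (fun r hr => hs r (by simp [hr]))
    simp [pvUnvis] at *
    calc a.count false + (l.map fun row => row.count false).sum ≤ C + l.length * C := by omega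
    _ = (l.length + 1) * C := by ring

lemma pv_unvis_le {grid : List (List String)} {v : List (List Bool)} (hs : pvSh grid v) :
    pvUnvis v ≤ grid.length * grid.headI.length := by
  have := pv_unvis_le_aux grid.headI.length v hs.2
  rw [hs.1] at this
  exact this

lemma pvDfs_spec (grid : List (List String)) : ∀ (k : Nat) (v : List (List Bool)),
    pvUnvis v ≤ k → pvSh grid v → ∀ (r c : Int),
    ∃ n v', pvSh grid v' ∧ pvUnvis v' ≤ pvUnvis v ∧
      ∀ f, pvUnvis v + 1 ≤ f → pvDfs grid f v r c = some (n, v') := by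
  intro k
  induction k with
  | zero =>
    intro v hk hs r c
    by_cases hb : r < 0 ∨ (grid.length : Int) ≤ r ∨ c < 0 ∨ (grid.headI.length : Int) ≤ c
        ∨ pvGridGet grid r c = "#" ∨ pvVisGet v r c = true
    · refine ⟨0, v, hs, le_rfl, ?_⟩
      intro f hf
      obtain ⟨f', rfl⟩ : ∃ f', f = f' + 1 := ⟨f - 1, by omega⟩
      simp only [pvDfs]
      rw [if_pos hb]
    · exfalso
      have hb' := hb; push Not at hb'
      obtain ⟨hb1, hb2, hb3, hb4, hb5, hb6⟩ := hb'
      have hv : pvVisGet v r c = false := by simpa using hb6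
      have hu0 := pv_unvis_mark hs (by omega) (by omega) (by omega) (by omega) hv
      omega
  | succ k ih =>
    intro v hk hs r c
    by_cases hb : r < 0 ∨ (grid.length : Int) ≤ r ∨ c < 0 ∨ (grid.headI.length : Int) ≤ c
        ∨ pvGridGet grid r c = "#" ∨ pvVisGet v r c = true
    · refine ⟨0, v, hs, le_rfl, ?_⟩
      intro f hf
      obtain ⟨f', rfl⟩ : ∃ f', f = f' + 1 := ⟨f - 1, by omega⟩
      simp only [pvDfs]
      rw [if_pos hb]
    · have hb' := hb; push Not at hb'
      obtain ⟨hb1, hb2, hb3, hb4, hb5, hb6⟩ := hb'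
      have hv : pvVisGet v r c = false := by simpa using hb6
      have hsh0 : pvSh grid (pvMark v r c) := pv_sh_mark hs
      have hu0 := pv_unvis_mark hs (by omega) (by omega) (by omega) (by omega) hv
      obtain ⟨n1, v1, hs1, hle1, hf1⟩ := ih (pvMark v r c) (by omega) hsh0 r (c+1)
      obtain ⟨n2, v2, hs2, hle2, hf2⟩ := ih v1 (by omega) hs1 r (c-1)
      obtain ⟨n3, v3, hs3, hle3, hf3⟩ := ih v2 (by omega) hs2 (r+1) c
      obtain ⟨n4, v4, hs4, hle4, hf4⟩ := ih v3 (by omega) hs3 (r-1) c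
      refine ⟨(if pvGridGet grid r c = "D" then (1:Int) else 0) + n1 + n2 + n3 + n4, v4, hs4,
        by omega, ?_⟩
      intro f hf
      obtain ⟨f', rfl⟩ : ∃ f', f = f' + 1 := ⟨f - 1, by omega⟩
      simp only [pvDfs]
      rw [if_neg hb]
      simp only [hf1 f' (by omega), hf2 f' (by omega), hf3 f' (by omega), hf4 f' (by omega)]

-- A's visited matrix starts all-false
lemma pv_visGet_init (R C : Nat) (r c : Int) (hr0 : 0 ≤ r) (hr : r < (R : Int))
    (hc0 : 0 ≤ c) (hc : c < (C : Int)) :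
    pvVisGet (List.replicate R (List.replicate C false)) r c = false := by
  rw [pv_visGet_nonneg _ _ _ hr0 hc0]
  rw [List.getElem?_replicate, if_pos (by omega : r.toNat < R), Option.getD_some,
      List.getElem?_replicate, if_pos (by omega : c.toNat < C), Option.getD_some]

-- B's guard is the negation of A's skip condition, through the coupling pvRel
lemma pv_guard_iff {grid : List (List String)} {v : List (List Bool)} {S : PySem.Set (Int × Int)}
    {r c : Int} (hrel : pvRel grid v S) :
    (0 ≤ r ∧ r < (grid.length : Int) ∧ 0 ≤ c ∧ c < (grid.headI.length : Int)
        ∧ (r, c) ∉ S ∧ pvCell grid r c ≠ "#") ↔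
    ¬ (r < 0 ∨ (grid.length : Int) ≤ r ∨ c < 0 ∨ (grid.headI.length : Int) ≤ c
        ∨ pvGridGet grid r c = "#" ∨ pvVisGet v r c = true) := by
  rw [pv_cell_eq]
  constructor
  · rintro ⟨h1, h2, h3, h4, h5, h6⟩
    intro hsk
    rcases hsk with h | h | h | h | h | h
    · omega
    · omega
    · omega
    · omega
    · exact h6 h
    · exact h5 ((hrel r c).mpr ⟨h1, h2, h3, h4, h⟩)
  · intro hb
    push Not at hb
    obtain ⟨h1, h2, h3, h4, h5, h6⟩ := hb
    refine ⟨h1, h2, h3, h4, fun hmem => ?_, h5⟩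
    exact h6 ((hrel r c).mp hmem).2.2.2.2

-- the central simulation: B's stack loop computes, continuation-style, what A's dfs computes
lemma pvFill_key (grid : List (List String)) : ∀ (u : Nat) (v : List (List Bool)),
    pvUnvis v = u → pvSh grid v → ∀ (S : PySem.Set (Int × Int)), pvRel grid v S →
    ∀ (r c : Int) (rest : List (Int × Int)) (t n : Int) (v' : List (List Bool)),
    (∀ f, pvUnvis v + 1 ≤ f → pvDfs grid f v r c = some (n, v')) →
    ∃ S', pvRel grid v' S' ∧
      ∀ (m : Int) (Sf : PySem.Set (Int × Int)),
      (∀ g, 5 * pvUnvis v' + rest.length + 1 ≤ g → pvFill grid g S' rest (t + n) = some (m, Sf)) →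
      ∀ h, 5 * pvUnvis v + rest.length + 2 ≤ h → pvFill grid h S ((r, c) :: rest) t = some (m, Sf) := by
  intro u
  induction u using Nat.strong_induction_on with
  | _ u ih =>
  intro v hu hs S hrel r c rest t n v' hdfs
  by_cases hb : r < 0 ∨ (grid.length : Int) ≤ r ∨ c < 0 ∨ (grid.headI.length : Int) ≤ c
      ∨ pvGridGet grid r c = "#" ∨ pvVisGet v r c = true
  · -- A skips: dfs returns (0, v); B's guard fails and it just pops
    have hd := hdfs (pvUnvis v + 1) le_rfl
    simp only [pvDfs] at hd
    rw [if_pos hb] at hd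
    rw [Option.some.injEq, Prod.mk.injEq] at hd
    obtain ⟨hn, hv'⟩ := hd
    subst hn; subst hv'
    refine ⟨S, hrel, ?_⟩
    intro m Sf hstk h hh
    obtain ⟨h', rfl⟩ : ∃ h', h = h' + 1 := ⟨h - 1, by omega⟩
    simp only [pvFill]
    rw [if_neg (fun hg => ((pv_guard_iff hrel).mp hg) hb)]
    simpa using hstk h' (by omega)
  · have hb' := hb; push Not at hb'
    obtain ⟨hb1, hb2, hb3, hb4, hb5, hb6⟩ := hb'
    have hv : pvVisGet v r c = false := by simpa using hb6
    have hsh0 : pvSh grid (pvMark v r c) := pv_sh_mark hs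
    have hu0 := pv_unvis_mark hs (by omega) (by omega) (by omega) (by omega) hv
    have hrel0 : pvRel grid (pvMark v r c) (PySem.Set.add S (r, c)) :=
      pv_rel_mark hs hrel (by omega) (by omega) (by omega) (by omega)
    obtain ⟨n1, v1, hs1, hle1, hf1⟩ :=
      pvDfs_spec grid (pvUnvis (pvMark v r c)) (pvMark v r c) le_rfl hsh0 r (c+1)
    obtain ⟨n2, v2, hs2, hle2, hf2⟩ := pvDfs_spec grid (pvUnvis v1) v1 le_rfl hs1 r (c-1)
    obtain ⟨n3, v3, hs3, hle3, hf3⟩ := pvDfs_spec grid (pvUnvis v2) v2 le_rfl hs2 (r+1) c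
    obtain ⟨n4, v4, hs4, hle4, hf4⟩ := pvDfs_spec grid (pvUnvis v3) v3 le_rfl hs3 (r-1) c
    have hd := hdfs (pvUnvis v + 1) le_rfl
    simp only [pvDfs] at hd
    rw [if_neg hb] at hd
    simp only [hf1 (pvUnvis v) (by omega), hf2 (pvUnvis v) (by omega),
      hf3 (pvUnvis v) (by omega), hf4 (pvUnvis v) (by omega)] at hd
    rw [Option.some.injEq, Prod.mk.injEq] at hd
    obtain ⟨hn, hv'⟩ := hd
    subst hn; subst hv'
    obtain ⟨S1, hrel1, hk1⟩ := ih (pvUnvis (pvMark v r c)) (by omega) (pvMark v r c) rfl hsh0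
      (PySem.Set.add S (r, c)) hrel0 r (c+1) ((r, c-1) :: (r+1, c) :: (r-1, c) :: rest)
      (t + (if pvGridGet grid r c = "D" then (1:Int) else 0)) n1 v1 hf1
    obtain ⟨S2, hrel2, hk2⟩ := ih (pvUnvis v1) (by omega) v1 rfl hs1 S1 hrel1 r (c-1)
      ((r+1, c) :: (r-1, c) :: rest)
      (t + (if pvGridGet grid r c = "D" then (1:Int) else 0) + n1) n2 v2 hf2
    obtain ⟨S3, hrel3, hk3⟩ := ih (pvUnvis v2) (by omega) v2 rfl hs2 S2 hrel2 (r+1) c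
      ((r-1, c) :: rest)
      (t + (if pvGridGet grid r c = "D" then (1:Int) else 0) + n1 + n2) n3 v3 hf3
    obtain ⟨S4, hrel4, hk4⟩ := ih (pvUnvis v3) (by omega) v3 rfl hs3 S3 hrel3 (r-1) c rest
      (t + (if pvGridGet grid r c = "D" then (1:Int) else 0) + n1 + n2 + n3) n4 v4 hf4
    refine ⟨S4, hrel4, ?_⟩
    intro m Sf hstk h hh
    obtain ⟨h', rfl⟩ : ∃ h', h = h' + 1 := ⟨h - 1, by omega⟩
    simp only [pvFill]
    rw [if_pos ((pv_guard_iff hrel).mpr hb)]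
    have ht' : (if pvCell grid r c = "D" then t + 1 else t)
        = t + (if pvGridGet grid r c = "D" then (1:Int) else 0) := by
      rw [pv_cell_eq]
      by_cases hD : pvGridGet grid r c = "D" <;> simp [hD]
    rw [ht']
    have A4 := hk4 m Sf (fun g hg => by
        rw [show t + (if pvGridGet grid r c = "D" then (1:Int) else 0) + n1 + n2 + n3 + n4
          = t + ((if pvGridGet grid r c = "D" then (1:Int) else 0) + n1 + n2 + n3 + n4) by ring]
        exact hstk g hg)
    have A3 := hk3 m Sf (fun g hg => A4 g (by simp at hg ⊢; omega))
    have A2 := hk2 m Sf (fun g hg => A3 g (by simp at hg ⊢; omega))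
    have A1 := hk1 m Sf (fun g hg => A2 g (by simp at hg ⊢; omega))
    exact A1 h' (by simp at hh ⊢; omega)

-- the seed bodies agree through the coupling
lemma pvSeed_eq (grid : List (List String)) (i j : Int) (ch : String)
    (hch : ch = pvGridGet grid i j)
    (s : List (List Bool) × Int) (s' : PySem.Set (Int × Int) × Int)
    (hs : pvSh grid s.1) (hrel : pvRel grid s.1 s'.1) (hbest : s.2 = s'.2)
    (hi0 : 0 ≤ i) (hi : i < (grid.length : Int)) (hj0 : 0 ≤ j)
    (hj : j < (grid.headI.length : Int)) :
    pvSh grid (pvSeedA grid i s j).1 ∧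
      pvRel grid (pvSeedA grid i s j).1 (pvScanB grid i s' (j, ch)).1 ∧
      (pvSeedA grid i s j).2 = (pvScanB grid i s' (j, ch)).2 := by
  unfold pvSeedA pvScanB
  by_cases hc : pvGridGet grid i j = "." ∧ pvVisGet s.1 i j = false
  · have hcB : (j, ch).2 = "." ∧ (i, (j, ch).1) ∉ s'.1 := by
      refine ⟨by simpa [hch] using hc.1, ?_⟩
      intro hmem
      have := ((hrel i j).mp hmem).2.2.2.2
      rw [hc.2] at this; exact Bool.false_ne_true this
    rw [if_pos hc, if_pos hcB]
    obtain ⟨n, v', hs', hle, hdfs⟩ := pvDfs_spec grid (pvUnvis s.1) s.1 le_rfl hs i j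
    have hub := pv_unvis_le hs
    obtain ⟨S', hrel', hkey⟩ := pvFill_key grid (pvUnvis s.1) s.1 rfl hs s'.1 hrel i j [] 0 n v' hdfs
    have hstk : ∀ g, 5 * pvUnvis v' + ([] : List (Int × Int)).length + 1 ≤ g →
        pvFill grid g S' [] ((0:Int) + n) = some ((0:Int) + n, S') := by
      intro g hg
      obtain ⟨g', rfl⟩ : ∃ g', g = g' + 1 := ⟨g - 1, by omega⟩
      simp only [pvFill]
    have hB := hkey ((0:Int) + n) S' hstk (5 * (grid.length * grid.headI.length) + 2)
      (by simp; omega)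
    rw [hdfs (grid.length * grid.headI.length + 1) (by omega), hB]
    exact ⟨hs', by simpa using hrel', by simp [hbest]⟩
  · have hcB : ¬ ((j, ch).2 = "." ∧ (i, (j, ch).1) ∉ s'.1) := by
      intro hB
      apply hc
      refine ⟨by simpa [hch] using hB.1, ?_⟩
      by_contra hv
      have hv' : pvVisGet s.1 i j = true := by simpa using hv
      exact hB.2 ((hrel i j).mpr ⟨hi0, hi, hj0, hj, hv'⟩)
    rw [if_neg hc, if_neg hcB]
    exact ⟨hs, hrel, hbest⟩

-- two folds over same-length lists preserve a relation, position by position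
lemma pv_foldl_rel {α α' β β' : Type} (R : α → α' → Prop) (f : α → β → α) (g : α' → β' → α') :
    ∀ (l : List β) (l' : List β'), l.length = l'.length →
    (∀ (k : Nat) (hk : k < l.length) (hk' : k < l'.length) (a : α) (a' : α'),
      R a a' → R (f a l[k]) (g a' l'[k])) →
    ∀ (a : α) (a' : α'), R a a' → R (l.foldl f a) (l'.foldl g a') := by
  intro l
  induction l with
  | nil =>
    intro l' hlen _ a a' ha
    rw [List.length_nil] at hlen
    rw [List.eq_nil_of_length_eq_zero hlen.symm]
    exact ha
  | cons b l ih =>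
    intro l' hlen hstep a a' ha
    cases l' with
    | nil => simp at hlen
    | cons b' l'' =>
      simp only [List.foldl_cons]
      refine ih l'' (by simpa using hlen) ?_ (f a b) (g a' b')
        (hstep 0 (by simp) (by simp) a a' ha)
      intro k hk hk' x x' hx
      simpa using hstep (k+1) (by simpa using hk) (by simpa using hk') x x' hx

-- the coupling carried through the outer folds
def pvR (grid : List (List String)) (s : List (List Bool) × Int)
    (s' : PySem.Set (Int × Int) × Int) : Prop :=
  pvSh grid s.1 ∧ pvRel grid s.1 s'.1 ∧ s.2 = s'.2

lemma pv_init (grid : List (List String)) :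
    pvR grid (List.replicate grid.length (List.replicate grid.headI.length false), (0:Int))
      (PySem.Set.empty, (0:Int)) := by
  refine ⟨⟨by simp, ?_⟩, ?_, rfl⟩
  · intro row hrow
    rw [List.eq_of_mem_replicate hrow]; simp
  · intro r c
    constructor
    · intro hmem
      simp [PySem.Set.empty] at hmem
    · rintro ⟨h1, h2, h3, h4, h5⟩
      rw [pv_visGet_init _ _ _ _ h1 h2 h3 h4] at h5
      exact absurd h5 Bool.false_ne_true

lemma pv_step (grid : List (List String)) (hpre : Pre_max_diamonds grid) (k : Nat)
    (hk : k < (PySem.List.pyRange 0 (grid.length : Int) 1).length)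
    (hk' : k < (PySem.List.enumerate grid 0).length)
    (a : List (List Bool) × Int) (a' : PySem.Set (Int × Int) × Int) (ha : pvR grid a a') :
    pvR grid
      ((PySem.List.pyRange 0 (grid.headI.length : Int) 1).foldl
        (pvSeedA grid ((PySem.List.pyRange 0 (grid.length : Int) 1)[k])) a)
      ((PySem.List.enumerate
          (((PySem.List.enumerate grid 0)[k]'hk').2.take grid.headI.length) 0).foldl
        (pvScanB grid ((PySem.List.enumerate grid 0)[k]'hk').1) a') := by
  have hkr : k < grid.length := by
    simpa [PySem.List.length_pyRange_one] using hk
  have hIdx : (PySem.List.pyRange 0 (grid.length : Int) 1)[k] = (k : Int) := by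
    rw [PySem.List.getElem_pyRange_one]; simp
  have hIdx' : (PySem.List.enumerate grid 0)[k]'hk' = ((k : Int), grid[k]) := by
    rw [PySem.List.getElem_enumerate]; simp
  rw [hIdx, hIdx']
  have hrowlen : grid.headI.length ≤ grid[k].length := hpre.2 _ (List.getElem_mem hkr)
  refine pv_foldl_rel (pvR grid) (pvSeedA grid (k : Int)) (pvScanB grid (k : Int))
    (PySem.List.pyRange 0 (grid.headI.length : Int) 1)
    (PySem.List.enumerate (grid[k].take grid.headI.length) 0)
    (by simp [PySem.List.length_pyRange_one, PySem.List.length_enumerate]; omega)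
    ?_ a a' ha
  intro m hm hm' s s' hs
  have hmc : m < grid.headI.length := by
    simpa [PySem.List.length_pyRange_one] using hm
  have hJ : (PySem.List.pyRange 0 (grid.headI.length : Int) 1)[m] = (m : Int) := by
    rw [PySem.List.getElem_pyRange_one]; simp
  have hJ' : (PySem.List.enumerate (grid[k].take grid.headI.length) 0)[m]'hm'
      = ((m : Int), grid[k][m]'(by omega)) := by
    rw [PySem.List.getElem_enumerate]
    simp [List.getElem_take]
  rw [hJ, hJ']
  have hch : grid[k][m]'(by omega) = pvGridGet grid (k : Int) (m : Int) := by
    rw [pv_gridGet_eq (by positivity) (by simpa using hkr) (by positivity)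
      (by simp; omega)]
    simp
  exact pvSeed_eq grid (k : Int) (m : Int) _ hch s s' hs.1 hs.2.1 hs.2.2
    (by positivity) (by exact_mod_cast hkr) (by positivity) (by exact_mod_cast hmc)

-- ===== VERDICT (by name: the statement is the Claim_ definition above) =====
theorem max_diamonds_spec : Claim_equal_max_diamonds := by
  intro grid _hdom hpre
  unfold Spec_max_diamonds max_diamonds max_diamonds_alt
  exact (pv_foldl_rel (pvR grid)
    (fun s i => (PySem.List.pyRange 0 (grid.headI.length : Int) 1).foldl (pvSeedA grid i) s)
    (fun s p =>
      (PySem.List.enumerate (p.2.take grid.headI.length) 0).foldl (pvScanB grid p.1) s)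
    (PySem.List.pyRange 0 (grid.length : Int) 1) (PySem.List.enumerate grid 0)
    (by simp [PySem.List.length_pyRange_one, PySem.List.length_enumerate])
    (fun k hk hk' a a' ha => pv_step grid hpre k hk hk' a a' ha)
    _ _ (pv_init grid)).2.2
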